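-- pv_equiv track=rewrite | github.com/MetaMask/metamask-mobile | scripts/generate_last_month_bug_test_matrix.py | severity_rank
-- ===== SOURCE A (Python) =====
-- def severity_rank(severity_labels: list[str]) -> tuple[int, str]:
--     if not severity_labels:
--         return (99, "Unlabeled")
--     candidates = []
--     for label in severity_labels:
--         low = label.lower()
--         if "sev0" in low:
--             candidates.append((0, label))
--         elif "sev1" in low:
--             candidates.append((1, label))
--         elif "sev2" in low or "sev-2" in low:
--             candidates.append((2, label))
--         elif "sev3" in low:
--             candidates.append((3, label))
--         else:
--             candidates.append((50, label))
--     candidates.sort(key=lambda x: x[0])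
--     return candidates[0]
-- ===== SOURCE B (Python) =====
-- def _rank(label: str) -> int:
--     low = label.lower()
--     if "sev0" in low:
--         return 0
--     if "sev1" in low:
--         return 1
--     if "sev2" in low or "sev-2" in low:
--         return 2
--     if "sev3" in low:
--         return 3
--     return 50
--
--
-- def severity_rank(severity_labels: list[str]) -> tuple[int, str]:
--     if not severity_labels:
--         return (99, "Unlabeled")
--     best = (_rank(severity_labels[0]), severity_labels[0])
--     for label in severity_labels[1:]:
--         r = _rank(label)
--         if r < best[0]:
--             best = (r, label)
--     return best
-- ===== Notes on version B (the rewrite author's own statement) =====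
-- stated objective: idiomatic
-- what changed: Instead of building a full (rank,label) candidates list and stably sorting it to take its first element, B computes each label's rank with a helper and keeps the first lowest-ranked (rank,label) in a single pass with a strict-less update.
import Mathlib
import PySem

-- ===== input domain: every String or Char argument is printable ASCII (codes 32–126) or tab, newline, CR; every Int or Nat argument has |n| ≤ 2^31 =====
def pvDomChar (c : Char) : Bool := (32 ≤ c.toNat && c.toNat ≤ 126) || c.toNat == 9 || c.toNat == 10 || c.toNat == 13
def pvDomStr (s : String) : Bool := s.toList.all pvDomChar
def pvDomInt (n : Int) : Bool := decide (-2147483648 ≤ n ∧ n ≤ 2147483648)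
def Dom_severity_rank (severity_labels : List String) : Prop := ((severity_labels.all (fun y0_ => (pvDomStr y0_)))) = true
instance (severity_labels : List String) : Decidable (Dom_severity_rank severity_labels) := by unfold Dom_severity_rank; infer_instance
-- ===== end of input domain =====

-- B replaces A's build-list-then-stable-sort with a rank helper and a single-pass first-minimum scan (same return values).

-- ===== PORT A =====
def severity_rank (severity_labels : List String) : Int × String :=
  if severity_labels = [] then (99, "Unlabeled")
  else
    let candidates := severity_labels.map (fun label =>
      let low := PySem.Str.lower label
      if PySem.Str.isIn "sev0" low then ((0 : Int), label)
      else if PySem.Str.isIn "sev1" low then (1, label)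
      else if PySem.Str.isIn "sev2" low || PySem.Str.isIn "sev-2" low then (2, label)
      else if PySem.Str.isIn "sev3" low then (3, label)
      else (50, label))
    match PySem.List.sorted candidates (fun x => x.1) false with
    | [] => (99, "Unlabeled")  -- unreachable: candidates is nonempty here
    | c :: _ => c

-- ===== PORT B =====
def rankOfLabel (label : String) : Int :=
  let low := PySem.Str.lower label
  if PySem.Str.isIn "sev0" low then 0
  else if PySem.Str.isIn "sev1" low then 1
  else if PySem.Str.isIn "sev2" low || PySem.Str.isIn "sev-2" low then 2
  else if PySem.Str.isIn "sev3" low then 3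
  else 50

def severity_rank_alt (severity_labels : List String) : Int × String :=
  match severity_labels with
  | [] => (99, "Unlabeled")
  | l :: rest =>
    rest.foldl (fun best label =>
      let r := rankOfLabel label
      if r < best.1 then (r, label) else best) (rankOfLabel l, l)

-- ===== PRECONDITION & SPEC =====
def Spec_severity_rank (severity_labels : List String) (out : Int × String) : Prop := out = severity_rank_alt severity_labels
instance (severity_labels : List String) (out : Int × String) : Decidable (Spec_severity_rank severity_labels out) := by unfold Spec_severity_rank; infer_instance

-- ===== CLAIM (what is proved, stated in full; the proofs are below) =====
def Claim_equal_severity_rank : Prop := ∀ (severity_labels : List String), Dom_severity_rank severity_labels → Spec_severity_rank severity_labels (severity_rank severity_labels)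

-- ===== LEMMAS AND PROOFS =====

-- A's per-label classification builds exactly the pair (rankOfLabel label, label).
theorem classify_eq_rank (label : String) :
    (let low := PySem.Str.lower label
     if PySem.Str.isIn "sev0" low then ((0 : Int), label)
     else if PySem.Str.isIn "sev1" low then (1, label)
     else if PySem.Str.isIn "sev2" low || PySem.Str.isIn "sev-2" low then (2, label)
     else if PySem.Str.isIn "sev3" low then (3, label)
     else (50, label)) = (rankOfLabel label, label) := by
  simp only [rankOfLabel]
  split_ifs <;> rfl

-- head? of insertBy: the new element wins exactly when `before` it beats the old head.
theorem head?_insertBy (before : Int × String → Int × String → Bool) (x : Int × String) :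
    ∀ ys : List (Int × String), (PySem.List.insertBy before x ys).head? =
      some (match ys with | [] => x | y :: _ => if before x y then x else y) := by
  intro ys
  cases ys with
  | nil => simp [PySem.List.insertBy]
  | cons y t =>
    simp only [PySem.List.insertBy]
    split_ifs <;> rfl

-- Invariant: folding insertBy keeps the head equal to the running strict-min fold.
theorem head?_foldl_insertBy (cs : List (Int × String)) :
    ∀ (ys : List (Int × String)) (y : Int × String), ys.head? = some y →
      ((cs.foldl (fun acc x => PySem.List.insertBy (fun a b => decide (a.1 < b.1)) x acc) ys).head?
        = some (cs.foldl (fun best c => if c.1 < best.1 then c else best) y)) := by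
  induction cs with
  | nil => intro ys y h; simpa using h
  | cons c t ih =>
    intro ys y h
    simp only [List.foldl_cons]
    apply ih
    rw [head?_insertBy]
    cases ys with
    | nil => simp at h
    | cons y' ys' =>
      simp only [List.head?_cons, Option.some.injEq] at h
      subst h
      by_cases hlt : c.1 < y'.1 <;> simp [hlt]

-- The head of A's stable sort is the first minimum by rank.
theorem head?_sorted (c : Int × String) (t : List (Int × String)) :
    (PySem.List.sorted (c :: t) (fun x => x.1) false).head? =
      some (t.foldl (fun best x => if x.1 < best.1 then x else best) c) := by
  rw [PySem.List.sorted_eq_foldl_insertBy]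
  simp only [List.foldl_cons]
  apply head?_foldl_insertBy
  simp [PySem.List.insertBy]

-- ===== VERDICT (by name: the statement is the Claim_ definition above) =====
theorem severity_rank_spec : Claim_equal_severity_rank := by
  intro ls _
  unfold Spec_severity_rank severity_rank severity_rank_alt
  cases ls with
  | nil => rfl
  | cons l rest =>
    simp only [if_neg (List.cons_ne_nil l rest)]
    have hmap : (l :: rest).map (fun label =>
        let low := PySem.Str.lower label
        if PySem.Str.isIn "sev0" low then ((0 : Int), label)
        else if PySem.Str.isIn "sev1" low then (1, label)
        else if PySem.Str.isIn "sev2" low || PySem.Str.isIn "sev-2" low then (2, label)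
        else if PySem.Str.isIn "sev3" low then (3, label)
        else (50, label)) = (l :: rest).map (fun label => (rankOfLabel label, label)) := by
      apply List.map_congr_left
      intro a _
      exact classify_eq_rank a
    rw [hmap]
    simp only [List.map_cons]
    have h := head?_sorted (rankOfLabel l, l) (rest.map (fun label => (rankOfLabel label, label)))
    rw [List.foldl_map] at h
    cases hs : PySem.List.sorted ((rankOfLabel l, l) :: rest.map (fun label => (rankOfLabel label, label))) (fun x => x.1) false with
    | nil =>
      rw [hs] at h; simp at h
    | cons c cs =>
      rw [hs] at h
      simp only [List.head?_cons, Option.some.injEq] at h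
      exact h
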